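-- pv_equiv track=rewrite | github.com/wazenmai/MIDI-BERT | preprocess_pop909/preprocess.py | remove_piano_notes_collision
-- ===== SOURCE A (Python) =====
-- def remove_piano_notes_collision(vocal_notes, piano_notes):
--     n_beats = len(vocal_notes)
--
--     for beat in range(n_beats):
--         if (beat - 1 >= 0 and len(vocal_notes[ beat - 1 ])) or \
--              len (vocal_notes[ beat ]) or \
--              (beat + 1 < n_beats and len(vocal_notes[ beat + 1 ])) or \
--              (beat + 2 < n_beats and len(vocal_notes[ beat + 2 ])):
--             piano_notes[ beat ] = []
--
--     return piano_notes
-- ===== SOURCE B (Python) =====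
-- # Scatter formulation: collect the beats to clear from each non-empty vocal beat
-- # (window j-2..j+1, clamped), then clear them; mutates piano_notes in place like A.
-- def remove_piano_notes_collision(vocal_notes, piano_notes):
--     n_beats = len(vocal_notes)
--     cleared = set()
--     for j in range(n_beats):
--         if vocal_notes[j]:
--             for b in range(max(0, j - 2), min(n_beats, j + 2)):
--                 cleared.add(b)
--     for b in sorted(cleared):
--         piano_notes[b] = []
--     return piano_notes
-- ===== Notes on version B (the rewrite author's own statement) =====
-- stated objective: alternative
-- what changed: Replaces A's per-beat poll of the four neighbouring vocal beats by a scatter pass: collect into a set the window j-2..j+1 around each non-empty vocal beat, then clear exactly those piano beats.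
import Mathlib
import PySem

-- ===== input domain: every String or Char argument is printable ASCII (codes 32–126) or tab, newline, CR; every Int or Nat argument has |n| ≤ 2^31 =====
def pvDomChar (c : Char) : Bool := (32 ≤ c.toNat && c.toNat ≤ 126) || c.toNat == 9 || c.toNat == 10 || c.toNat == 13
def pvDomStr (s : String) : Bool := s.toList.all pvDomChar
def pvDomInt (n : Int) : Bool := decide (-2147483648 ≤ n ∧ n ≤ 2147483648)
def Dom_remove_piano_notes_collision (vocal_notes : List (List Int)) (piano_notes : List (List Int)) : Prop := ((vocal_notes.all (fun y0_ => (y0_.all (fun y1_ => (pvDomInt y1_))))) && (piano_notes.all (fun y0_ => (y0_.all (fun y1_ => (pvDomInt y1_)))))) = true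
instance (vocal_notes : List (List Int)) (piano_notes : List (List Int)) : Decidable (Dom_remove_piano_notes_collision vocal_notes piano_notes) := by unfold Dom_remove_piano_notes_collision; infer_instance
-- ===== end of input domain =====

-- B replaces A's per-beat poll of neighbouring vocal beats by a scatter pass over the
-- non-empty vocal beats (objective: alternative decomposition, same cost).
-- Both A and B mutate piano_notes in place in Python; the claim is about the return value.

-- ===== PORT A =====
-- the if-condition of A's loop body (len(..) truthiness = list non-empty)
def pvCondA (v : List (List Int)) (n beat : Nat) : Bool :=
  (decide (1 ≤ beat) && decide (v.getD (beat - 1) [] ≠ [])) ||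
  decide (v.getD beat [] ≠ []) ||
  (decide (beat + 1 < n) && decide (v.getD (beat + 1) [] ≠ [])) ||
  (decide (beat + 2 < n) && decide (v.getD (beat + 2) [] ≠ []))

def remove_piano_notes_collision (vocal_notes : List (List Int)) (piano_notes : List (List Int)) : List (List Int) :=
  (List.range vocal_notes.length).foldl
    (fun piano beat =>
      if pvCondA vocal_notes vocal_notes.length beat then piano.set beat ([] : List Int) else piano)
    piano_notes

-- ===== PORT B =====
-- range(max(0, j-2), min(n, j+2)) on Nat indices: j - 2 is Nat truncated subtraction = max(0, j-2)
def remove_piano_notes_collision_alt (vocal_notes : List (List Int)) (piano_notes : List (List Int)) : List (List Int) :=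
  let n := vocal_notes.length
  let cleared : PySem.Set Nat :=
    (List.range n).foldl
      (fun s j =>
        if vocal_notes.getD j [] ≠ [] then
          (List.range' (j - 2) (min n (j + 2) - (j - 2))).foldl PySem.Set.add s
        else s)
      PySem.Set.empty
  (PySem.List.sorted cleared (fun x => x) false).foldl
    (fun piano b => piano.set b ([] : List Int)) piano_notes

-- ===== PRECONDITION & SPEC =====
-- Pre_ excludes exactly the inputs where Python A raises IndexError (a beat to be
-- cleared lies beyond len(piano_notes)); Python B raises there too.
def Pre_remove_piano_notes_collision (vocal_notes : List (List Int)) (piano_notes : List (List Int)) : Prop :=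
  ∀ j, j < vocal_notes.length → vocal_notes.getD j [] ≠ [] →
    min (vocal_notes.length - 1) (j + 1) < piano_notes.length

instance (vocal_notes : List (List Int)) (piano_notes : List (List Int)) : Decidable (Pre_remove_piano_notes_collision vocal_notes piano_notes) := by unfold Pre_remove_piano_notes_collision; infer_instance

def pvWitness_remove_piano_notes_collision : List (List Int) × List (List Int) := ([[1]], [[2], [3]])

def Spec_remove_piano_notes_collision (vocal_notes : List (List Int)) (piano_notes : List (List Int)) (out : List (List Int)) : Prop := out = remove_piano_notes_collision_alt vocal_notes piano_notes
instance (vocal_notes : List (List Int)) (piano_notes : List (List Int)) (out : List (List Int)) : Decidable (Spec_remove_piano_notes_collision vocal_notes piano_notes out) := by unfold Spec_remove_piano_notes_collision; infer_instance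

-- ===== CLAIM (what is proved, stated in full; the proofs are below) =====
def Claim_equal_remove_piano_notes_collision : Prop := ∀ (vocal_notes : List (List Int)) (piano_notes : List (List Int)), Dom_remove_piano_notes_collision vocal_notes piano_notes → Pre_remove_piano_notes_collision vocal_notes piano_notes → Spec_remove_piano_notes_collision vocal_notes piano_notes (remove_piano_notes_collision vocal_notes piano_notes)

-- ===== LEMMAS AND PROOFS =====

-- scatter fold: element b of the result is [] iff b ∈ S (indices in S in range)
theorem pv_foldl_set_getElem? (S : List Nat) (p : List (List Int)) (b : Nat)
    (h : ∀ x ∈ S, x < p.length) :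
    (S.foldl (fun q i => q.set i ([] : List Int)) p)[b]? =
      if b ∈ S then some [] else p[b]? := by
  induction S generalizing p with
  | nil => simp
  | cons s S ih =>
    have hs : s < p.length := h s (by simp)
    have hrest : ∀ x ∈ S, x < (p.set s ([] : List Int)).length := by
      intro x hx; simpa using h x (List.mem_cons_of_mem _ hx)
    rw [List.foldl_cons, ih (p.set s []) hrest]
    by_cases hbS : b ∈ S
    · simp [hbS]
    · by_cases hbs : b = s
      · subst hbs; simp [hbS, hs]
      · simp [hbS, hbs, Ne.symm hbs]

-- length is preserved by A's conditional-set fold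
theorem pv_len_foldA (c : Nat → Bool) (l : List Nat) (p : List (List Int)) :
    (l.foldl (fun piano beat => if c beat then piano.set beat ([] : List Int) else piano) p).length
      = p.length := by
  induction l generalizing p with
  | nil => rfl
  | cons x xs ih =>
    rw [List.foldl_cons, ih]
    split <;> simp

-- A's fold: element b of the result is [] iff b < m and the condition holds at b
theorem pv_A_getElem? (v : List (List Int)) (p : List (List Int)) (n : Nat) (m : Nat)
    (hH : ∀ i, i < m → pvCondA v n i = true → i < p.length) (b : Nat) :
    ((List.range m).foldl
        (fun piano beat => if pvCondA v n beat then piano.set beat ([] : List Int) else piano)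
        p)[b]? =
      if b < m ∧ pvCondA v n b = true then some [] else p[b]? := by
  induction m with
  | zero => simp
  | succ m ih =>
    have hH' : ∀ i, i < m → pvCondA v n i = true → i < p.length := by
      intro i hi; exact hH i (Nat.lt_succ_of_lt hi)
    have hlen := pv_len_foldA (pvCondA v n) (List.range m) p
    rw [List.range_succ, List.foldl_append, List.foldl_cons, List.foldl_nil]
    by_cases hc : pvCondA v n m = true
    · have hm : m < p.length := hH m (Nat.lt_succ_self m) hc
      rw [if_pos hc, List.getElem?_set]
      by_cases hbm : m = b
      · subst hbm
        simp [hlen, hm, hc]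
      · rw [if_neg hbm, ih hH']
        exact if_congr (by constructor <;> (rintro ⟨h1, h2⟩; exact ⟨by omega, h2⟩)) rfl rfl
    · rw [if_neg hc, ih hH']
      refine if_congr ⟨fun ⟨h1, h2⟩ => ⟨by omega, h2⟩, fun ⟨h1, h2⟩ => ⟨?_, h2⟩⟩ rfl rfl
      rcases Nat.lt_succ_iff_lt_or_eq.mp h1 with h | h
      · exact h
      · subst h; exact absurd h2 hc

-- membership in a fold of Set.add over a range'
theorem pv_mem_foldl_add_range' (a k : Nat) (s : PySem.Set Nat) (y : Nat) :
    y ∈ (List.range' a k).foldl PySem.Set.add s ↔ y ∈ s ∨ (a ≤ y ∧ y < a + k) := by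
  induction k generalizing a s with
  | zero => simp
  | succ k ih =>
    rw [List.range'_succ, List.foldl_cons, ih]
    rw [PySem.Set.mem_add]
    constructor
    · rintro (⟨h | h⟩ | h)
      · exact Or.inl h
      · subst h; right; omega
      · right; omega
    · rintro (h | h)
      · exact Or.inl (Or.inl h)
      · by_cases hy : y = a
        · exact Or.inl (Or.inr hy)
        · right; omega

-- membership in B's cleared set
theorem pv_mem_cleared (v : List (List Int)) (n : Nat) (l : List Nat) (s : PySem.Set Nat) (y : Nat) :
    y ∈ l.foldl
        (fun s j =>
          if v.getD j [] ≠ [] then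
            (List.range' (j - 2) (min n (j + 2) - (j - 2))).foldl PySem.Set.add s
          else s) s ↔
      y ∈ s ∨ ∃ j ∈ l, v.getD j [] ≠ [] ∧ j - 2 ≤ y ∧ y < min n (j + 2) := by
  induction l generalizing s with
  | nil => simp
  | cons x l ih =>
    rw [List.foldl_cons, ih]
    by_cases hx : v.getD x [] ≠ []
    · rw [if_pos hx, pv_mem_foldl_add_range']
      constructor
      · rintro ((h | h) | ⟨j, hj, h1, h2, h3⟩)
        · exact Or.inl h
        · right; exact ⟨x, by simp, hx, by omega, by omega⟩
        · right; exact ⟨j, List.mem_cons_of_mem _ hj, h1, h2, h3⟩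
      · rintro (h | ⟨j, hj, h1, h2, h3⟩)
        · exact Or.inl (Or.inl h)
        · rcases List.mem_cons.mp hj with rfl | hj
          · left; right; omega
          · right; exact ⟨j, hj, h1, h2, h3⟩
    · rw [if_neg hx]
      constructor
      · rintro (h | ⟨j, hj, h1, h2, h3⟩)
        · exact Or.inl h
        · right; exact ⟨j, List.mem_cons_of_mem _ hj, h1, h2, h3⟩
      · rintro (h | ⟨j, hj, h1, h2, h3⟩)
        · exact Or.inl h
        · rcases List.mem_cons.mp hj with rfl | hj
          · exact absurd h1 hx
          · right; exact ⟨j, hj, h1, h2, h3⟩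

-- window equivalence: A's four-way neighbour test at b ⇔ b is in the scatter window of some j
theorem pv_window (v : List (List Int)) (b : Nat) (hb : b < v.length) :
    pvCondA v v.length b = true ↔
      ∃ j, j < v.length ∧ v.getD j [] ≠ [] ∧ j - 2 ≤ b ∧ b < min v.length (j + 2) := by
  constructor
  · intro h
    simp only [pvCondA, Bool.or_eq_true, Bool.and_eq_true, decide_eq_true_eq] at h
    rcases h with ((⟨h1, h2⟩ | h) | ⟨h1, h2⟩) | ⟨h1, h2⟩
    · exact ⟨b - 1, by omega, h2, by omega, by omega⟩
    · exact ⟨b, hb, h, by omega, by omega⟩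
    · exact ⟨b + 1, h1, h2, by omega, by omega⟩
    · exact ⟨b + 2, h1, h2, by omega, by omega⟩
  · rintro ⟨j, hj, hne, h1, h2⟩
    simp only [pvCondA, Bool.or_eq_true, Bool.and_eq_true, decide_eq_true_eq]
    have hcase : j = b + 2 ∨ j = b + 1 ∨ j = b ∨ (1 ≤ b ∧ j = b - 1) := by omega
    rcases hcase with h | h | h | ⟨hb1, h⟩
    · subst h; exact Or.inr ⟨hj, hne⟩
    · subst h; exact Or.inl (Or.inr ⟨hj, hne⟩)
    · subst h; exact Or.inl (Or.inl (Or.inr hne))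
    · subst h; exact Or.inl (Or.inl (Or.inl ⟨hb1, hne⟩))

-- ===== VERDICT (by name: the statement is the Claim_ definition above) =====
theorem remove_piano_notes_collision_spec : Claim_equal_remove_piano_notes_collision := by
  intro v p _ hpre
  unfold Spec_remove_piano_notes_collision
  unfold remove_piano_notes_collision remove_piano_notes_collision_alt
  set n := v.length with hn
  -- every index satisfying the condition is within piano_notes
  have hH : ∀ i, i < n → pvCondA v n i = true → i < p.length := by
    intro i hi hc
    obtain ⟨j, hj, hne, h1, h2⟩ := (pv_window v i hi).mp hc
    have := hpre j hj hne
    omega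
  -- membership characterization of the sorted cleared list
  have hmem : ∀ y, y ∈ PySem.List.sorted
      ((List.range n).foldl
        (fun s j =>
          if v.getD j [] ≠ [] then
            (List.range' (j - 2) (min n (j + 2) - (j - 2))).foldl PySem.Set.add s
          else s) PySem.Set.empty) (fun x => x) false ↔ (y < n ∧ pvCondA v n y = true) := by
    intro y
    rw [PySem.List.mem_sorted, pv_mem_cleared]
    constructor
    · rintro (h | ⟨j, hj, hne, h1, h2⟩)
      · exact absurd h (by simp [PySem.Set.empty])
      · have hyn : y < n := by omega
        exact ⟨hyn, (pv_window v y hyn).mpr ⟨j, List.mem_range.mp hj, hne, h1, h2⟩⟩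
    · rintro ⟨hyn, hc⟩
      obtain ⟨j, hj, hne, h1, h2⟩ := (pv_window v y hyn).mp hc
      exact Or.inr ⟨j, List.mem_range.mpr hj, hne, h1, h2⟩
  apply List.ext_getElem?
  intro b
  rw [pv_A_getElem? v p n n hH b,
      pv_foldl_set_getElem? _ p b (by intro x hx; exact hH x ((hmem x).mp hx).1 ((hmem x).mp hx).2)]
  by_cases h : b < n ∧ pvCondA v n b = true
  · rw [if_pos h, if_pos ((hmem b).mpr h)]
  · rw [if_neg h, if_neg (fun hc => h ((hmem b).mp hc))]
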